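-- pv_equiv track=rewrite | github.com/atoffano/roi_des_roses | ia.py | calc_pos
-- ===== SOURCE A (Python) =====
-- def calc_pos(carte):
--     dist_parcourue = int(carte[-1]) # Récupère l'ordre de grandeur associé à la carte (i.e 1, 2 ou 3)
--     c_pion = 0
--     l_pion = 0
--     for i in range(len(carte)-1):  # On calcule les coordonnées d'arrivée du pion en fonction du/des vecteurs (N, E, S, O) associés à la carte
--         if carte[i] == 'N':
--             l_pion -= dist_parcourue
--         elif carte[i] == 'E':
--             c_pion += dist_parcourue
--         elif carte[i] == 'S':
--             l_pion += dist_parcourue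
--         else:
--             c_pion -= dist_parcourue
--     return l_pion, c_pion
-- ===== SOURCE B (Python) =====
-- def calc_pos(carte):
--     d = int(carte[-1])
--     body = carte[:-1]
--     n = body.count('N')
--     e = body.count('E')
--     s = body.count('S')
--     west = len(body) - n - e - s
--     return (s - n) * d, (e - west) * d
-- ===== Notes on version B (the rewrite author's own statement) =====
-- stated objective: idiomatic
-- what changed: Replaces A's per-character interleaved accumulation loop with three str.count scans over carte[:-1] plus closed-form arithmetic ((s-n)*d, (e-west)*d), deriving the west count as length minus the other counts to reproduce A's catch-all else branch.
import Mathlib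
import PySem

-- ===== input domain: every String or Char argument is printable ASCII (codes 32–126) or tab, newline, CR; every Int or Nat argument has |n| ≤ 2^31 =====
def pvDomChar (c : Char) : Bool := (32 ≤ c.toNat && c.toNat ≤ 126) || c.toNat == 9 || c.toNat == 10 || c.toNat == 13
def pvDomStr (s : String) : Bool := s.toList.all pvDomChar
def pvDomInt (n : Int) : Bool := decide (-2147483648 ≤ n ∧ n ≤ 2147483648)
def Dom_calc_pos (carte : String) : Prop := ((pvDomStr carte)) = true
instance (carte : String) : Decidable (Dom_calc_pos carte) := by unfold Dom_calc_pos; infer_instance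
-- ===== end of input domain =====

-- B replaces A's interleaved per-character accumulation loop by three count scans plus closed-form arithmetic (same cost class; objective: idiomatic).

-- ===== PORT A =====
-- A: d = int(carte[-1]); loop i in range(len(carte)-1) updating (l_pion, c_pion); return (l_pion, c_pion).
def calc_pos (carte : String) : Int × Int :=
  match PySem.Str.pyGet? carte (-1) with          -- carte[-1]  (none = IndexError)
  | none => (0, 0)
  | some ch =>
    match PySem.Int.ofChars? [ch] with            -- int(...)   (none = ValueError)
    | none => (0, 0)
    | some d =>
      let cs := carte.toList
      (PySem.List.pyRange 0 ((cs.length : Int) - 1) 1).foldl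
        (fun (p : Int × Int) i =>
          let c := PySem.List.pyGetD cs i ' '     -- carte[i]; i is always in range here
          if c = 'N' then (p.1 - d, p.2)
          else if c = 'E' then (p.1, p.2 + d)
          else if c = 'S' then (p.1 + d, p.2)
          else (p.1, p.2 - d))
        (0, 0)

-- ===== PORT B =====
-- B: d = int(carte[-1]); body = carte[:-1]; count N/E/S; west = rest; closed-form result.
def calc_pos_alt (carte : String) : Int × Int :=
  match PySem.Str.pyGet? carte (-1) with
  | none => (0, 0)
  | some ch =>
    match PySem.Int.ofChars? [ch] with
    | none => (0, 0)
    | some d =>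
      let body := PySem.Str.slice carte none (some (-1))   -- carte[:-1]
      let n : Int := PySem.Str.count body "N"
      let e : Int := PySem.Str.count body "E"
      let s : Int := PySem.Str.count body "S"
      let west : Int := (PySem.Str.len body : Int) - n - e - s
      ((s - n) * d, (e - west) * d)

-- ===== PRECONDITION & SPEC =====
-- Pre_ excludes exactly the inputs where A raises: the empty string (IndexError on carte[-1])
-- and strings whose last character is not a decimal digit (ValueError in int(carte[-1])).
def Pre_calc_pos (carte : String) : Prop :=
  carte.toList.getLast?.any (fun c => decide ('0' ≤ c ∧ c ≤ '9')) = true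
instance (carte : String) : Decidable (Pre_calc_pos carte) := by unfold Pre_calc_pos; infer_instance
def pvWitness_calc_pos : String := "NEO2"

def Spec_calc_pos (carte : String) (out : Int × Int) : Prop := out = calc_pos_alt carte
instance (carte : String) (out : Int × Int) : Decidable (Spec_calc_pos carte out) := by unfold Spec_calc_pos; infer_instance

-- ===== CLAIM (what is proved, stated in full; the proofs are below) =====
def Claim_equal_calc_pos : Prop := ∀ (carte : String), Dom_calc_pos carte → Pre_calc_pos carte → Spec_calc_pos carte (calc_pos carte)

-- ===== LEMMAS AND PROOFS =====

-- s.count(c) for a single character is List.count (PySem has no singleton-substring count lemma).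
theorem pvCountGo_singleton (c : Char) : ∀ (l : List Char) (fuel acc : Nat), l.length ≤ fuel →
    PySem.Chars.count.go [c] fuel l acc = acc + l.count c := by
  intro l
  induction l with
  | nil => intro fuel acc h; cases fuel <;> simp [PySem.Chars.count.go]
  | cons h t ih =>
    intro fuel acc hf
    cases fuel with
    | zero => simp at hf
    | succ f =>
      simp only [PySem.Chars.count.go, List.isPrefixOf, Bool.and_true, List.count_cons]
      by_cases hc : c = h
      · subst hc
        simp only [BEq.rfl, if_pos, List.length_singleton, List.drop_succ_cons, List.drop_zero]
        rw [ih f (acc+1) (by simpa using hf)]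
        omega
      · have hb : (c == h) = false := by simp [hc]
        simp only [hb, Bool.false_eq_true, if_false]
        rw [ih f acc (by simpa using hf)]
        simp [Ne.symm hc]

theorem pvCount_singleton (c : Char) (l : List Char) : PySem.Chars.count l [c] = l.count c := by
  simp [PySem.Chars.count, pvCountGo_singleton c l l.length 0 le_rfl]

-- A's interleaved loop over any character list, in closed form.
theorem pvFold_counts (d : Int) (l : List Char) : ∀ p : Int × Int,
    l.foldl (fun (p : Int × Int) c =>
        if c = 'N' then (p.1 - d, p.2)
        else if c = 'E' then (p.1, p.2 + d)
        else if c = 'S' then (p.1 + d, p.2)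
        else (p.1, p.2 - d)) p
    = (p.1 + ((l.count 'S' : Int) - (l.count 'N' : Int)) * d,
       p.2 + ((l.count 'E' : Int) -
         ((l.length : Int) - (l.count 'N' : Int) - (l.count 'E' : Int) - (l.count 'S' : Int))) * d) := by
  induction l with
  | nil => intro p; simp
  | cons h t ih =>
    intro p
    simp only [List.foldl_cons]
    rw [ih]
    by_cases hN : h = 'N'
    · simp only [List.count_cons, List.length_cons, Prod.ext_iff, hN, reduceIte, beq_iff_eq]
      constructor <;> (push_cast; ring)
    · by_cases hE : h = 'E'
      · simp only [List.count_cons, List.length_cons, Prod.ext_iff, hE, reduceIte, beq_iff_eq]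
        constructor <;> (push_cast; ring)
      · by_cases hS : h = 'S'
        · simp only [List.count_cons, List.length_cons, Prod.ext_iff, hS, reduceIte, beq_iff_eq]
          constructor <;> (push_cast; ring)
        · simp only [List.count_cons, List.length_cons, Prod.ext_iff, if_neg hN, if_neg hE,
            if_neg hS, beq_iff_eq]
          constructor <;> (push_cast; ring)

-- The index loop over range(len(carte)-1) is the fold over carte[:-1].
theorem pvRangeFold_dropLast (cs : List Char) (f : Int × Int → Char → Int × Int) (init : Int × Int) :
    (PySem.List.pyRange 0 ((cs.length : Int) - 1) 1).foldl
      (fun p i => f p (PySem.List.pyGetD cs i ' ')) init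
    = cs.dropLast.foldl f init := by
  cases cs with
  | nil => simp [PySem.List.pyRange_one_eq_nil]
  | cons h t =>
    have hlen : ((h :: t).length : Int) - 1 = ((h :: t).dropLast.length : Int) := by
      simp [List.length_dropLast]
    rw [hlen]
    have hcongr : (PySem.List.pyRange 0 (((h :: t).dropLast.length : Int)) 1).foldl
        (fun p i => f p (PySem.List.pyGetD (h :: t) i ' ')) init
      = (PySem.List.pyRange 0 (((h :: t).dropLast.length : Int)) 1).foldl
        (fun p i => f p (PySem.List.pyGetD (h :: t).dropLast i ' ')) init := by
      apply PySem.List.foldl_congr_mem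
      intro acc x hx
      have hm := (PySem.List.mem_pyRange_one).mp hx
      have hx0 : 0 ≤ x := hm.1
      have hxl : x < (((h :: t).dropLast.length : Int)) := hm.2
      have hle : (h :: t).dropLast.length ≤ (h :: t).length := by
        simp [List.length_dropLast]
      rw [PySem.List.pyGetD_eq_getElem _ _ hx0 (by omega),
          PySem.List.pyGetD_eq_getElem _ _ hx0 (by exact_mod_cast hxl)]
      rw [List.getElem_dropLast]
    rw [hcongr]
    exact PySem.List.foldl_pyRange_zero_pyGetD' (h :: t).dropLast ' ' f init

theorem pvPorts_eq (carte : String) : calc_pos carte = calc_pos_alt carte := by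
  unfold calc_pos calc_pos_alt
  cases hg : PySem.Str.pyGet? carte (-1) with
  | none => rfl
  | some ch =>
    dsimp only
    cases hd : PySem.Int.ofChars? [ch] with
    | none => rfl
    | some d =>
      dsimp only
      have hbody : (PySem.Str.slice carte none (some (-1))).toList = carte.toList.dropLast := by
        simp [PySem.List.slice_to_neg_one]
      have hcount : ∀ c : Char,
          PySem.Str.count (PySem.Str.slice carte none (some (-1))) (String.ofList [c])
            = carte.toList.dropLast.count c := by
        intro c
        rw [show PySem.Str.count (PySem.Str.slice carte none (some (-1))) (String.ofList [c])
              = PySem.Chars.count (PySem.Str.slice carte none (some (-1))).toList [c] from by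
            simp]
        rw [hbody, pvCount_singleton]
      have hlen : (PySem.Str.len (PySem.Str.slice carte none (some (-1))) : Int)
          = (carte.toList.dropLast.length : Int) := by
        simp [hbody]
      have hN := hcount 'N'
      have hE := hcount 'E'
      have hS := hcount 'S'
      rw [show ("N" : String) = String.ofList ['N'] from by simp,
          show ("E" : String) = String.ofList ['E'] from by simp,
          show ("S" : String) = String.ofList ['S'] from by simp,
          hN, hE, hS, hlen]
      have h2 := pvRangeFold_dropLast carte.toList
        (fun (p : Int × Int) c =>
          if c = 'N' then (p.1 - d, p.2)
          else if c = 'E' then (p.1, p.2 + d)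
          else if c = 'S' then (p.1 + d, p.2)
          else (p.1, p.2 - d)) (0, 0)
      refine h2.trans ?_
      rw [pvFold_counts]
      refine Prod.ext ?_ ?_ <;> (simp; try ring)

-- ===== VERDICT (by name: the statement is the Claim_ definition above) =====
theorem calc_pos_spec : Claim_equal_calc_pos := by
  intro carte _ _
  unfold Spec_calc_pos
  exact pvPorts_eq carte
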